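-- pv_equiv track=rewrite | github.com/YashB63/GFG-Daily-Questions | Day 28/Minimum Integer/minimum_integer.py | minimumInteger
-- ===== SOURCE A (Python) =====
-- from typing import List
--
-- def minimumInteger(N : int, A : List[int]) -> int:
--
--     A.sort()
--     A.reverse()
--     s = sum(A)
--
--     for i in A:
--         x = N * i
--         if x >= s:
--             y = i
--     return y
-- ===== SOURCE B (Python) =====
-- from typing import List
--
-- def minimumInteger(N: int, A: List[int]) -> int:
--     # single linear pass over the (unsorted) list: no sort needed
--     s = sum(A)
--     return min(i for i in A if N * i >= s)
-- ===== Notes on version B (the rewrite author's own statement) =====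
-- stated objective: faster
-- what changed: B replaces sort+reverse+scan with a single linear pass: compute the sum once and take the minimum of the elements i with N*i >= sum.
import Mathlib
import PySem

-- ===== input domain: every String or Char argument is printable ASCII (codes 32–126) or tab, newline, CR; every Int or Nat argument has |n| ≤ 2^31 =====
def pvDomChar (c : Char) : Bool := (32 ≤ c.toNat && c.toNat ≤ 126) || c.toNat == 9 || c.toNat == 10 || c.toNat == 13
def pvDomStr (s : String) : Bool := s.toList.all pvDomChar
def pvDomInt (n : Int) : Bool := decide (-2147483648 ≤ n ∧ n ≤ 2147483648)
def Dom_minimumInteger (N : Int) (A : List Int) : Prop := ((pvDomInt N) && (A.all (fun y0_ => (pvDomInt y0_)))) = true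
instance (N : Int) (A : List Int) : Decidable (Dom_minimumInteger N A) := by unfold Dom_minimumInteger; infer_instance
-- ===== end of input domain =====

-- B avoids A's sort: one linear pass (sum, then min of the qualifying elements); equivalence is about
-- the RETURN value only — Python A sorts/reverses A in place, B leaves A untouched.

-- ===== PORT A =====
-- A.sort(); A.reverse(); s = sum(A); for i in A: if N*i >= s: y = i; return y
-- the loop variable y starts unbound (ported as Option Int, none = unbound; Pre_ guarantees it is set)
def minimumInteger (N : Int) (A : List Int) : Int :=
  let B := (PySem.List.sorted A (fun x => x) false).reverse
  let s := B.sum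
  (B.foldl (fun y i => if N * i ≥ s then some i else y) none).getD 0

-- ===== PORT B =====
-- s = sum(A); return min(i for i in A if N*i >= s)   (min of empty raises; excluded by Pre_)
def minimumInteger_alt (N : Int) (A : List Int) : Int :=
  let s := A.sum
  (PySem.List.min? (A.filter (fun i => decide (N * i ≥ s))) (fun x => x)).getD 0

-- ===== PRECONDITION & SPEC =====
-- Pre_ excludes exactly the inputs on which Python A raises UnboundLocalError
-- (no element i of A satisfies N*i >= sum(A); B's min() raises ValueError there too).
def Pre_minimumInteger (N : Int) (A : List Int) : Prop := ∃ i ∈ A, N * i ≥ A.sum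
instance (N : Int) (A : List Int) : Decidable (Pre_minimumInteger N A) := by unfold Pre_minimumInteger; infer_instance
def pvWitness_minimumInteger : Int × List Int := (3, [1, 2, 3, 4])

def Spec_minimumInteger (N : Int) (A : List Int) (out : Int) : Prop := out = minimumInteger_alt N A
instance (N : Int) (A : List Int) (out : Int) : Decidable (Spec_minimumInteger N A out) := by unfold Spec_minimumInteger; infer_instance

-- ===== CLAIM (what is proved, stated in full; the proofs are below) =====
def Claim_equal_minimumInteger : Prop := ∀ (N : Int) (A : List Int), Dom_minimumInteger N A → Pre_minimumInteger N A → Spec_minimumInteger N A (minimumInteger N A)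

-- ===== LEMMAS AND PROOFS =====

-- A's loop keeps the LAST satisfying element it sees
lemma foldl_lastFilter (P : Int → Bool) :
    ∀ (L : List Int) (y0 : Option Int),
      L.foldl (fun y i => if P i then some i else y) y0
        = ((L.filter P).getLast?).or y0 := by
  intro L
  induction L with
  | nil => intro y0; rfl
  | cons a t ih =>
    intro y0
    by_cases hP : P a
    · simp only [List.foldl_cons, hP, if_true, List.filter_cons, ih]
      cases hft : t.filter P with
      | nil => simp
      | cons b u =>
        rw [List.getLast?_cons_cons]
        rcases hbl : (b :: u).getLast? with _ | c
        · simp [List.getLast?_eq_none_iff] at hbl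
        · rfl
    · simp [List.foldl_cons, hP, ih]

-- in a (weakly) decreasing list the last element is a minimum
lemma getLast?_isMin : ∀ (F : List Int) (l x : Int),
    F.Pairwise (fun a b => b ≤ a) → F.getLast? = some l → x ∈ F → l ≤ x := by
  intro F
  induction F with
  | nil => intro l x _ h; simp at h
  | cons a t ih =>
    intro l x hp hl hx
    rcases List.pairwise_cons.mp hp with ⟨ha, ht⟩
    cases ht' : t with
    | nil =>
      subst ht'
      simp at hl hx
      omega
    | cons b u =>
      subst ht'
      rw [List.getLast?_cons_cons] at hl
      rcases List.mem_cons.mp hx with rfl | hx'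
      · have hlmem : l ∈ b :: u := List.mem_of_getLast? hl
        exact ha l hlmem
      · exact ih l x ht hl hx'

theorem minimumInteger_key (N : Int) (A : List Int) (h : Pre_minimumInteger N A) :
    minimumInteger N A = minimumInteger_alt N A := by
  have hperm : ((PySem.List.sorted A (fun x : Int => x) false).reverse).Perm A :=
    (List.reverse_perm _).trans (PySem.List.sorted_perm A _ false)
  have hsum : ((PySem.List.sorted A (fun x : Int => x) false).reverse).sum = A.sum := hperm.sum_eq
  set B := (PySem.List.sorted A (fun x : Int => x) false).reverse with hBdef
  set P : Int → Bool := fun i => decide (N * i ≥ A.sum) with hPdef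
  have hpermF : (B.filter P).Perm (A.filter P) := hperm.filter P
  obtain ⟨i, hiA, hi⟩ := h
  have hAf : i ∈ A.filter P := List.mem_filter.mpr ⟨hiA, by simp [hPdef]; omega⟩
  have hAfne : A.filter P ≠ [] := fun hnil => by simp [hnil] at hAf
  have hBfne : B.filter P ≠ [] := fun hnil => hAfne ((hnil ▸ hpermF).symm.eq_nil)
  -- B is weakly decreasing, hence so is its filter
  have hBpair : B.Pairwise (fun a b : Int => b ≤ a) := by
    rw [hBdef, List.pairwise_reverse]
    exact PySem.List.sorted_pairwise A (fun x : Int => x)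
  have hFpair : (B.filter P).Pairwise (fun a b : Int => b ≤ a) := hBpair.filter P
  -- last element of B.filter P
  obtain ⟨l, hl⟩ : ∃ l, (B.filter P).getLast? = some l := by
    rcases hgl : (B.filter P).getLast? with _ | c
    · exact absurd (List.getLast?_eq_none_iff.mp hgl) hBfne
    · exact ⟨c, rfl⟩
  have hlA : l ∈ A.filter P := hpermF.subset (List.mem_of_getLast? hl)
  -- the minimum over A.filter P
  obtain ⟨m, hm⟩ : ∃ m, PySem.List.min? (A.filter P) (fun x : Int => x) = some m := by
    rcases hmm : PySem.List.min? (A.filter P) (fun x : Int => x) with _ | c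
    · exact absurd ((PySem.List.min?_eq_none_iff _ _).mp hmm) hAfne
    · exact ⟨c, rfl⟩
  have hmA : m ∈ A.filter P := PySem.List.min?_mem hm
  have hml : m ≤ l := PySem.List.min?_isMin hm l hlA
  have hlm : l ≤ m := getLast?_isMin (B.filter P) l m hFpair hl (hpermF.mem_iff.mpr hmA)
  have hlmeq : l = m := le_antisymm hlm hml
  show (B.foldl (fun y i => if N * i ≥ B.sum then some i else y) none).getD 0
      = (PySem.List.min? (A.filter (fun i => decide (N * i ≥ A.sum))) (fun x : Int => x)).getD 0
  rw [hsum]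
  have hfold : B.foldl (fun y i => if N * i ≥ A.sum then some i else y) none
      = ((B.filter P).getLast?).or none := by
    have := foldl_lastFilter P B none
    simpa [hPdef] using this
  rw [hfold, hl, ← hPdef, hm, hlmeq]
  rfl

-- ===== VERDICT (by name: the statement is the Claim_ definition above) =====
theorem minimumInteger_spec : Claim_equal_minimumInteger := by
  intro N A _ hpre
  unfold Spec_minimumInteger
  exact minimumInteger_key N A hpre
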